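-- pv_equiv track=rewrite | github.com/jjpterdh/algorithm | ll/pick_mine.py | solution
-- ===== SOURCE A (Python) =====
-- def solution(picks, minerals):
--     answer=0
--     sum=0
--     # 곡괭이의 수를 구한다.
--     for i in picks:
--         sum += i
--
--     #곡괭이로 캘 수 있는 광물만큼 자른다.
--     num = sum * 5
--     if len(minerals)>sum:
--         minerals = minerals[:num]
--
--     #광물들을 조사한다.
--     new_minerals =[[0,0,0] for _ in range((len(minerals) //5 +1))]
--     for i in range(len(minerals)):
--         if minerals[i]=='diamond':
--             new_minerals[i//5][0]+=1
--         elif minerals[i]=='iron':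
--             new_minerals[i//5][1]+=1
--         elif minerals[i]=='stone':
--             new_minerals[i//5][2]+=1
--
--
--     #광물의 순서를 다이아몬드, 철, 돌 순서대로 정렬해준다.
--
--     new_minerals.sort(key=lambda x:(x[0],x[1],x[2]), reverse=True)
--
--     #정렬된 광물들을 다이아,철,돌 곡괭이 순서대로 캔다.
--     for i in new_minerals:
--          dia,iron,stone = i
--          for j in range(len(picks)):
--             if picks[j]>0 and j==0:
--                 picks[j]-=1
--                 answer += dia + iron + stone
--                 break
--             elif picks[j]>0 and j==1:
--                 picks[j]-=1
--                 answer += (5*dia) + iron + stone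
--                 break
--             elif picks[j]>0 and j==2:
--                 picks[j]-=1
--                 answer += (25*dia) + (5*iron) + stone
--                 break
--
--     return answer
-- ===== SOURCE B (Python) =====
-- def solution(picks, minerals):
--     # Different algorithm: counting-sort chunks by their bounded (dia, iron, stone)
--     # key instead of comparison-sorting, then one zip pass over a lazy weight
--     # sequence instead of a per-chunk scan.  (Unlike A, does NOT mutate `picks`.)
--     total = sum(picks)
--     if len(minerals) > total:
--         minerals = minerals[:total * 5]
--     # count chunks of 5 by their (d, i, s) signature
--     counts = {}
--     rest = minerals
--     while rest:
--         chunk, rest = rest[:5], rest[5:]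
--         d = i = s = 0
--         for m in chunk:
--             if m == 'diamond':
--                 d += 1
--             elif m == 'iron':
--                 i += 1
--             elif m == 'stone':
--                 s += 1
--         counts[(d, i, s)] = counts.get((d, i, s), 0) + 1
--     # bucket order: all possible signatures, descending (counting sort, O(1) keys)
--     keys = [(d, i, s) for d in range(5, -1, -1)
--                       for i in range(5 - d, -1, -1)
--                       for s in range(5 - d - i, -1, -1)]
--     chunks = []
--     for k in keys:
--         chunks += [k] * counts.get(k, 0)
--
--     # weight sequence: pick j (fatigue tier) is usable max(picks[j], 0) times;
--     # lazy: zip() below pulls at most len(chunks) weights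
--     def weights():
--         for cap, w in zip(picks[:3], [(1, 1, 1), (5, 1, 1), (25, 5, 1)]):
--             for _ in range(max(cap, 0)):
--                 yield w
--
--     return sum(wd * d + wi * i + ws * s
--                for (d, i, s), (wd, wi, ws) in zip(chunks, weights()))
-- ===== Notes on version B (the rewrite author's own statement) =====
-- stated objective: alternative
-- what changed: B replaces A's comparison sort of the 5-mineral chunks with a counting sort over the bounded (dia,iron,stone) chunk signatures (a dict counter plus enumeration of all <=56 possible signatures in descending order) and replaces A's per-chunk rescan of the mutated picks list with a single zip against a precomputed weight sequence; B does not mutate picks.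
import Mathlib
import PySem

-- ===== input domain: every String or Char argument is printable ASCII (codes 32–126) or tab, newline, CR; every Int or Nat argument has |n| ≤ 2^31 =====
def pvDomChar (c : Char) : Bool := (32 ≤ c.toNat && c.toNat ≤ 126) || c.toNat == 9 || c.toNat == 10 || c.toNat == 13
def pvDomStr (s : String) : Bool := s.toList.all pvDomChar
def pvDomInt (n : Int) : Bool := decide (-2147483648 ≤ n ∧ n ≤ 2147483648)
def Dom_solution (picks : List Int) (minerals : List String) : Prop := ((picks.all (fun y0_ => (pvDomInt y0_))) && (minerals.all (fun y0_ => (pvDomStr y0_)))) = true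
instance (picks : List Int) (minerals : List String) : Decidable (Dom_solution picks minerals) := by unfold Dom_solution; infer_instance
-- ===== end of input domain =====

-- B replaces A's comparison sort of the 5-mineral chunks by a counting sort over the
-- bounded (dia,iron,stone) signatures and A's per-chunk rescan of the (mutated) picks
-- list by one zip with a lazily generated weight sequence; equivalence is about the
-- RETURN value only (A decrements entries of `picks` in place, B leaves it untouched).

-- ===== PORT A =====
-- the if/elif mineral classifier shared by both Pythons (same branch order)
def pvBump (m : String) (t : Int × Int × Int) : Int × Int × Int :=
  if m == "diamond" then (t.1 + 1, t.2.1, t.2.2)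
  else if m == "iron" then (t.1, t.2.1 + 1, t.2.2)
  else if m == "stone" then (t.1, t.2.1, t.2.2 + 1)
  else t

-- `for i in range(len(minerals)): new_minerals[i//5][..] += 1` (index i carried along)
def pvCountGo : List String → Nat → List (Int × Int × Int) → List (Int × Int × Int)
  | [], _, nm => nm
  | m :: rest, i, nm => pvCountGo rest (i + 1) (nm.modify (i / 5) (pvBump m))

-- sort key lambda x: (x[0], x[1], x[2])  (Python tuple order = lexicographic)
def pvKey (x : Int × Int × Int) : Lex (Int × Lex (Int × Int)) :=
  toLex (x.1, toLex (x.2.1, x.2.2))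

-- inner `for j in range(len(picks)): … break`
def pvMineLoop (j : Nat) (picks : List Int) (answer : Int) (dia iron stone : Int) :
    List Int × Int :=
  if _h : j < picks.length then
    let pj := picks.getD j 0      -- picks[j], j < len(picks) so in range
    if pj > 0 && j == 0 then (picks.set 0 (pj - 1), answer + (dia + iron + stone))
    else if pj > 0 && j == 1 then (picks.set 1 (pj - 1), answer + (5 * dia + iron + stone))
    else if pj > 0 && j == 2 then (picks.set 2 (pj - 1), answer + (25 * dia + 5 * iron + stone))
    else pvMineLoop (j + 1) picks answer dia iron stone
  else (picks, answer)
termination_by picks.length - j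

-- outer `for i in new_minerals:` over the (picks, answer) state
def pvMineAll (chunks : List (Int × Int × Int)) (picks : List Int) (answer : Int) :
    List Int × Int :=
  chunks.foldl (fun st c => pvMineLoop 0 st.1 st.2 c.1 c.2.1 c.2.2) (picks, answer)

def solution (picks : List Int) (minerals : List String) : Int :=
  let answer : Int := 0
  let sum : Int := picks.foldl (fun s i => s + i) 0
  let num : Int := sum * 5
  let minerals' : List String :=
    if (minerals.length : Int) > sum then PySem.List.slice minerals none (some num)
    else minerals
  let nm0 := List.replicate (minerals'.length / 5 + 1) ((0 : Int), (0 : Int), (0 : Int))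
  let nm := pvCountGo minerals' 0 nm0
  let sortedNm := PySem.List.sorted nm pvKey true
  (pvMineAll sortedNm picks answer).2

-- ===== PORT B =====
-- per-chunk signature: d = i = s = 0; for m in chunk: if/elif classifier
def pvChunkSig (chunk : List String) : Int × Int × Int :=
  chunk.foldl (fun t m => pvBump m t) (0, 0, 0)

-- `while rest: chunk, rest = rest[:5], rest[5:]; counts[k] = counts.get(k,0)+1`
def pvCountChunks : List String → PySem.Dict (Int × Int × Int) Int →
    PySem.Dict (Int × Int × Int) Int
  | [], counts => counts
  | m :: rest0, counts =>
      let chunk := (m :: rest0).take 5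
      let rest := (m :: rest0).drop 5
      let k := pvChunkSig chunk
      pvCountChunks rest (counts.insert k (counts.getD k 0 + 1))
termination_by r => r.length
decreasing_by simp only [List.length_drop, List.length_cons]; omega

-- all possible signatures, descending (the list comprehension over range(…,-1,-1))
def pvKeys : List (Int × Int × Int) :=
  (PySem.List.pyRange 5 (-1) (-1)).flatMap (fun d =>
    (PySem.List.pyRange (5 - d) (-1) (-1)).flatMap (fun i =>
      (PySem.List.pyRange (5 - d - i) (-1) (-1)).map (fun s => (d, i, s))))

-- `for k in keys: chunks += [k] * counts.get(k, 0)`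
def pvChunksB (counts : PySem.Dict (Int × Int × Int) Int) : List (Int × Int × Int) :=
  pvKeys.foldl (fun acc k => acc ++ PySem.List.pyRepeat [k] (counts.getD k 0)) []

-- the weights() generator: for cap, w in zip(picks[:3], […]) yield w max(cap,0) times
-- (ported eagerly as the full finite sequence; zip below truncates exactly as Python's zip does)
def pvWeights (picks : List Int) : List (Int × Int × Int) :=
  ((PySem.List.slice picks none (some 3)).zip
      [((1 : Int), (1 : Int), (1 : Int)), (5, 1, 1), (25, 5, 1)]).foldl
    (fun acc cw => acc ++ PySem.List.pyRepeat [cw.2] (max cw.1 0)) []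

-- wd*d + wi*i + ws*s for ((d,i,s),(wd,wi,ws))
def pvDot (cw : (Int × Int × Int) × (Int × Int × Int)) : Int :=
  cw.2.1 * cw.1.1 + cw.2.2.1 * cw.1.2.1 + cw.2.2.2 * cw.1.2.2

def solution_alt (picks : List Int) (minerals : List String) : Int :=
  let total : Int := picks.sum
  let minerals' : List String :=
    if (minerals.length : Int) > total then PySem.List.slice minerals none (some (total * 5))
    else minerals
  let counts := pvCountChunks minerals' PySem.Dict.empty
  let chunks := pvChunksB counts
  let weights := pvWeights picks
  ((chunks.zip weights).map pvDot).sum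

-- ===== PRECONDITION & SPEC =====
def Spec_solution (picks : List Int) (minerals : List String) (out : Int) : Prop := out = solution_alt picks minerals
instance (picks : List Int) (minerals : List String) (out : Int) : Decidable (Spec_solution picks minerals out) := by unfold Spec_solution; infer_instance

-- ===== CLAIM (what is proved, stated in full; the proofs are below) =====
def Claim_equal_solution : Prop := ∀ (picks : List Int) (minerals : List String), Dom_solution picks minerals → Spec_solution picks minerals (solution picks minerals)

-- ===== LEMMAS AND PROOFS =====

-- proof-only helper: the chunk signatures in chunk order
def pvChunkTriples : List String → List (Int × Int × Int)
  | [] => []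
  | m :: rest0 => pvChunkSig ((m :: rest0).take 5) :: pvChunkTriples ((m :: rest0).drop 5)
termination_by r => r.length
decreasing_by simp only [List.length_drop, List.length_cons]; omega

-- the padding chunk A's `len//5 + 1` adds when len % 5 == 0
def pvPad (ms : List String) : List (Int × Int × Int) :=
  if ms.length % 5 = 0 then [(0, 0, 0)] else []

lemma pvModifyModify {α : Type} (l : List α) (c : Nat) (f g : α → α) :
    (l.modify c f).modify c g = l.modify c (fun x => g (f x)) := by
  induction l generalizing c with
  | nil => simp
  | cons x t ih =>
    cases c with
    | zero => simp
    | succ n => simp [ih]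

lemma pvModifyAppend {α : Type} (pre : List α) (l : List α) (f : α → α) :
    (pre ++ l).modify pre.length f = pre ++ l.modify 0 f := by
  induction pre with
  | nil => simp
  | cons x t ih => simp [ih]

-- ---- A's counting loop produces the chunk signatures in order, plus the pad ----
lemma pvCountGo_append (es rest : List String) (i : Nat) (nm : List (Int × Int × Int)) :
    pvCountGo (es ++ rest) i nm = pvCountGo rest (i + es.length) (pvCountGo es i nm) := by
  induction es generalizing i nm with
  | nil => simp [pvCountGo]
  | cons m t ih =>
    simp only [List.cons_append, pvCountGo, List.length_cons]
    rw [ih]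
    have : i + 1 + t.length = i + (t.length + 1) := by omega
    rw [this]

lemma pvCountGo_chunk (es : List String) (c r : Nat) (nm : List (Int × Int × Int))
    (h : r + es.length ≤ 5) :
    pvCountGo es (5 * c + r) nm = nm.modify c (fun t => es.foldl (fun t m => pvBump m t) t) := by
  induction es generalizing r nm with
  | nil =>
    simp only [pvCountGo, List.foldl_nil]
    exact (List.modify_id c nm).symm
  | cons m t ih =>
    have hr : r < 5 := by simp at h; omega
    have hdiv : (5 * c + r) / 5 = c := by omega
    have hstep : 5 * c + r + 1 = 5 * c + (r + 1) := by omega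
    simp only [pvCountGo, hdiv, hstep]
    rw [ih (r + 1) _ (by simp at h ⊢; omega), pvModifyModify]
    rfl

lemma pvCountGo_aligned (ms : List String) (c : Nat) (pre : List (Int × Int × Int))
    (hpre : pre.length = c) :
    pvCountGo ms (5 * c) (pre ++ List.replicate (ms.length / 5 + 1) (0, 0, 0)) =
      pre ++ (pvChunkTriples ms ++ pvPad ms) := by
  induction ms using pvChunkTriples.induct generalizing c pre with
  | case1 => simp [pvCountGo, pvChunkTriples, pvPad]
  | case2 m rest0 ih =>
    subst hpre
    by_cases h5 : 5 ≤ (m :: rest0).length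
    · -- a full first chunk, then recurse on the rest
      have hlen5 : ((m :: rest0).take 5).length = 5 := by
        rw [List.length_take]; omega
      have h1 := pvCountGo_append ((m :: rest0).take 5) ((m :: rest0).drop 5) (5 * pre.length)
        (pre ++ List.replicate ((m :: rest0).length / 5 + 1) (0, 0, 0))
      rw [List.take_append_drop, hlen5] at h1
      rw [h1]
      have hchunk := pvCountGo_chunk ((m :: rest0).take 5) pre.length 0
        (pre ++ List.replicate ((m :: rest0).length / 5 + 1) (0, 0, 0))
        (by rw [hlen5])
      rw [Nat.add_zero] at hchunk
      rw [hchunk, List.replicate_succ, pvModifyAppend]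
      have hmod : (((0:Int),(0:Int),(0:Int)) :: List.replicate ((m :: rest0).length / 5) ((0:Int),(0:Int),(0:Int))).modify 0
          (fun t => ((m :: rest0).take 5).foldl (fun t m => pvBump m t) t)
          = pvChunkSig ((m :: rest0).take 5) ::
            List.replicate ((m :: rest0).length / 5) ((0:Int),(0:Int),(0:Int)) := by
        simp [pvChunkSig]
      rw [hmod]
      have hq : (m :: rest0).length / 5 = ((m :: rest0).drop 5).length / 5 + 1 := by
        rw [List.length_drop]; omega
      have h55 : 5 * pre.length + 5 = 5 * (pre.length + 1) := by ring
      rw [hq, h55, show pre ++ pvChunkSig ((m :: rest0).take 5) ::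
            List.replicate (((m :: rest0).drop 5).length / 5 + 1) ((0:Int),(0:Int),(0:Int))
          = (pre ++ [pvChunkSig ((m :: rest0).take 5)]) ++
            List.replicate (((m :: rest0).drop 5).length / 5 + 1) ((0:Int),(0:Int),(0:Int)) by simp]
      rw [ih (pre.length + 1) _ (by simp)]
      have hTr : pvChunkTriples (m :: rest0) =
          pvChunkSig ((m :: rest0).take 5) :: pvChunkTriples ((m :: rest0).drop 5) := by
        rw [pvChunkTriples]
      have hPad : pvPad (m :: rest0) = pvPad ((m :: rest0).drop 5) := by
        unfold pvPad
        rw [List.length_drop]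
        have : (m :: rest0).length % 5 = ((m :: rest0).length - 5) % 5 := by omega
        rw [this]
      rw [hTr, hPad]
      simp
    · -- a single partial chunk
      have hle : (m :: rest0).length ≤ 5 := by omega
      have hpos : 1 ≤ (m :: rest0).length := by simp
      have hchunk := pvCountGo_chunk (m :: rest0) pre.length 0
        (pre ++ List.replicate ((m :: rest0).length / 5 + 1) (0, 0, 0))
        (by omega)
      rw [Nat.add_zero] at hchunk
      have hdiv0 : (m :: rest0).length / 5 = 0 := by omega
      rw [hchunk, hdiv0, pvModifyAppend]
      have htake : (m :: rest0).take 5 = m :: rest0 := List.take_of_length_le hle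
      have hdrop : (m :: rest0).drop 5 = [] := List.drop_eq_nil_of_le hle
      have hTr : pvChunkTriples (m :: rest0) = [pvChunkSig (m :: rest0)] := by
        rw [pvChunkTriples, htake, hdrop, pvChunkTriples]
      have hPad : pvPad (m :: rest0) = [] := by
        unfold pvPad
        rw [if_neg (by omega)]
      rw [hTr, hPad]
      simp [pvChunkSig]

-- ---- counts dict counts the chunk signatures ----
lemma pvCountChunks_getD (rest : List String) (counts : PySem.Dict (Int × Int × Int) Int)
    (k : Int × Int × Int) :
    (pvCountChunks rest counts).getD k 0 =
      counts.getD k 0 + ((pvChunkTriples rest).count k : Int) := by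
  induction rest, counts using pvCountChunks.induct with
  | case1 counts => simp [pvCountChunks, pvChunkTriples]
  | case2 m rest0 counts _chunk _rest _k ih =>
    have hkk : _k = pvChunkSig ((m :: rest0).take 5) := rfl
    have hrr : _rest = (m :: rest0).drop 5 := rfl
    simp only [hkk, hrr] at ih
    simp only [pvCountChunks, pvChunkTriples]
    rw [ih, PySem.Dict.getD_insert, List.count_cons]
    by_cases hk : k = pvChunkSig ((m :: rest0).take 5)
    · subst hk
      simp only [beq_self_eq_true, if_true]
      push_cast
      ring
    · have h2 : (pvChunkSig ((m :: rest0).take 5) == k) = false :=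
        beq_eq_false_iff_ne.mpr (Ne.symm hk)
      rw [if_neg hk, h2]
      push_cast
      ring

-- ---- chunk signatures are bounded ----
lemma pvBumps_bounds (es : List String) (t : Int × Int × Int) :
    t.1 ≤ (es.foldl (fun t m => pvBump m t) t).1 ∧
    t.2.1 ≤ (es.foldl (fun t m => pvBump m t) t).2.1 ∧
    t.2.2 ≤ (es.foldl (fun t m => pvBump m t) t).2.2 ∧
    (es.foldl (fun t m => pvBump m t) t).1 + (es.foldl (fun t m => pvBump m t) t).2.1 +
      (es.foldl (fun t m => pvBump m t) t).2.2 ≤ t.1 + t.2.1 + t.2.2 + es.length := by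
  induction es generalizing t with
  | nil => simp
  | cons m es ih =>
    have hb : t.1 ≤ (pvBump m t).1 ∧ t.2.1 ≤ (pvBump m t).2.1 ∧ t.2.2 ≤ (pvBump m t).2.2 ∧
        (pvBump m t).1 + (pvBump m t).2.1 + (pvBump m t).2.2 ≤ t.1 + t.2.1 + t.2.2 + 1 := by
      unfold pvBump; split_ifs <;> simp <;> omega
    have := ih (pvBump m t)
    simp only [List.foldl_cons, List.length_cons]
    push_cast
    omega

lemma pvChunkSig_mem_pvKeys (chunk : List String) (h : chunk.length ≤ 5) :
    pvChunkSig chunk ∈ pvKeys := by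
  have hb := pvBumps_bounds chunk (0, 0, 0)
  simp only [pvChunkSig] at *
  rcases hs : chunk.foldl (fun t m => pvBump m t) ((0:Int), (0:Int), (0:Int)) with ⟨d, i, s⟩
  rw [hs] at hb
  simp at hb
  have hlen : (chunk.length : Int) ≤ 5 := by exact_mod_cast h
  simp only [pvKeys, List.mem_flatMap, List.mem_map, PySem.List.mem_pyRange_neg_one]
  exact ⟨d, by omega, i, by omega, s, by omega, rfl⟩

lemma pvChunkTriples_mem_pvKeys (ms : List String) :
    ∀ k ∈ pvChunkTriples ms, k ∈ pvKeys := by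
  induction ms using pvChunkTriples.induct with
  | case1 => simp [pvChunkTriples]
  | case2 m rest0 ih =>
    intro k hk
    rw [pvChunkTriples] at hk
    rcases List.mem_cons.mp hk with h | h
    · subst h; exact pvChunkSig_mem_pvKeys _ (by simp [List.length_take])
    · exact ih k h

-- ---- chunksB is a descending rearrangement of the chunk signatures ----
lemma pvChunksB_eq_flatMap (counts : PySem.Dict (Int × Int × Int) Int) :
    pvChunksB counts = pvKeys.flatMap (fun k => List.replicate (counts.getD k 0).toNat k) := by
  simp [pvChunksB, PySem.List.pyRepeat_singleton, List.flatMap_def]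

lemma pvKeys_pairwise : pvKeys.Pairwise (fun a b => pvKey b < pvKey a) := by decide

lemma pvKeys_nodup : pvKeys.Nodup := by decide

lemma pvCountFlat (l : List (Int × Int × Int)) (n : (Int × Int × Int) → Nat)
    (k : Int × Int × Int) (hl : l.Nodup) :
    ((l.flatMap fun k' => List.replicate (n k') k').count k) = if k ∈ l then n k else 0 := by
  induction l with
  | nil => simp
  | cons a t ih =>
    have hnd := List.nodup_cons.mp hl
    simp only [List.flatMap_cons, List.count_append, List.count_replicate, ih hnd.2]
    by_cases hk : k = a
    · subst hk; simp [hnd.1]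
    · simp [hk, Ne.symm hk]

lemma pvMem_chunksB (counts : PySem.Dict (Int × Int × Int) Int) (x : Int × Int × Int)
    (hx : x ∈ pvChunksB counts) : x ∈ pvKeys := by
  rw [pvChunksB_eq_flatMap] at hx
  obtain ⟨k, hk, hxk⟩ := List.mem_flatMap.mp hx
  rwa [List.eq_of_mem_replicate hxk]

lemma pvChunksB_perm (ms : List String) :
    (pvChunksB (pvCountChunks ms PySem.Dict.empty)).Perm (pvChunkTriples ms) := by
  rw [List.perm_iff_count]
  intro k
  rw [pvChunksB_eq_flatMap, pvCountFlat _ _ _ pvKeys_nodup]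
  have hget := pvCountChunks_getD ms PySem.Dict.empty k
  by_cases hk : k ∈ pvKeys
  · simp [hk, hget]
  · simp only [hk, if_false]
    symm
    rw [List.count_eq_zero]
    intro hmem
    exact hk (pvChunkTriples_mem_pvKeys _ _ hmem)

lemma pvFlatMapPairwise (l : List (Int × Int × Int)) (n : (Int × Int × Int) → Nat)
    (hl : l.Pairwise (fun a b => pvKey b < pvKey a)) :
    (l.flatMap fun k => List.replicate (n k) k).Pairwise (fun a b => pvKey b ≤ pvKey a) := by
  induction l with
  | nil => simp
  | cons a t ih =>
    simp only [List.flatMap_cons]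
    rw [List.pairwise_append]
    refine ⟨?_, ih (List.pairwise_cons.mp hl).2, ?_⟩
    · rw [List.pairwise_replicate]; right; exact le_rfl
    · intro x hx y hy
      have hxa := List.eq_of_mem_replicate hx
      obtain ⟨k', hk', hy'⟩ := List.mem_flatMap.mp hy
      have hlt : pvKey k' < pvKey a := (List.pairwise_cons.mp hl).1 k' hk'
      rw [hxa, List.eq_of_mem_replicate hy']
      exact le_of_lt hlt

lemma pvChunksB_pairwise (counts : PySem.Dict (Int × Int × Int) Int) :
    (pvChunksB counts).Pairwise (fun a b => pvKey b ≤ pvKey a) := by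
  rw [pvChunksB_eq_flatMap]
  exact pvFlatMapPairwise _ _ pvKeys_pairwise

lemma pvKey_nonneg_mem (x : Int × Int × Int) (hx : x ∈ pvKeys) :
    pvKey (0, 0, 0) ≤ pvKey x := by
  obtain ⟨d, hd, i, hi, s, hs, rfl⟩ := by
    simpa only [pvKeys, List.mem_flatMap, List.mem_map, PySem.List.mem_pyRange_neg_one] using hx
  unfold pvKey
  rw [Prod.Lex.le_iff]
  rcases lt_or_eq_of_le (show (0:Int) ≤ d by omega) with h | h
  · left; simpa using h
  · right
    refine ⟨by simpa using h, ?_⟩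
    simp only [ofLex_toLex]
    rw [Prod.Lex.le_iff]
    rcases lt_or_eq_of_le (show (0:Int) ≤ i by omega) with h2 | h2
    · left; simpa using h2
    · right
      exact ⟨by simpa using h2, by simpa using (show (0:Int) ≤ s by omega)⟩

lemma pvKey_inj : Function.Injective pvKey := by
  intro a b h
  unfold pvKey at h
  have h1 := congrArg ofLex h
  simp only [ofLex_toLex, Prod.mk.injEq] at h1
  have h2 := congrArg ofLex h1.2
  simp only [ofLex_toLex, Prod.mk.injEq] at h2
  exact Prod.ext h1.1 (Prod.ext h2.1 h2.2)

-- A's sorted list is exactly chunksB ++ pad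
lemma pvSorted_eq (ms : List String) :
    PySem.List.sorted (pvCountGo ms 0 (List.replicate (ms.length / 5 + 1) (0, 0, 0))) pvKey true
      = pvChunksB (pvCountChunks ms PySem.Dict.empty) ++ pvPad ms := by
  have hnm := pvCountGo_aligned ms 0 [] rfl
  simp only [Nat.mul_zero, List.nil_append] at hnm
  rw [hnm]
  apply PySem.List.eq_of_perm_of_pairwise_le_of_injective
    (key := fun x => OrderDual.toDual (pvKey x))
    (fun a b hab => pvKey_inj (by simpa using hab))
  · exact (PySem.List.sorted_perm _ _ _).trans
      ((pvChunksB_perm ms).symm.append_right (pvPad ms))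
  · exact (PySem.List.sorted_pairwise_rev _ pvKey).imp (fun h => by simpa using h)
  · rw [List.pairwise_append]
    refine ⟨(pvChunksB_pairwise _).imp (fun h => by simpa using h), ?_, ?_⟩
    · unfold pvPad; split <;> simp
    · intro a ha b hb
      have hb0 : b = (0, 0, 0) := by
        unfold pvPad at hb; split at hb <;> simp_all
      simp only [hb0]
      show pvKey (0,0,0) ≤ pvKey a
      exact pvKey_nonneg_mem a (pvMem_chunksB _ _ ha)

-- ---- the mining loop is the zip with the weight sequence ----
lemma pvMineLoop_ge3 (j : Nat) (picks : List Int) (ans dia iron stone : Int) (h : 3 ≤ j) :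
    pvMineLoop j picks ans dia iron stone = (picks, ans) := by
  have key : ∀ n j, picks.length - j ≤ n → 3 ≤ j →
      pvMineLoop j picks ans dia iron stone = (picks, ans) := by
    intro n
    induction n with
    | zero =>
      intro j hn hj
      rw [pvMineLoop]
      split
      · omega
      · rfl
    | succ n ih =>
      intro j hn hj
      rw [pvMineLoop]
      split
      · have h0 : (j == 0) = false := by simp; omega
        have h1 : (j == 1) = false := by simp; omega
        have h2 : (j == 2) = false := by simp; omega
        simp only [h0, h1, h2, Bool.and_false, Bool.false_eq_true, if_false]
        exact ih (j + 1) (by omega) (by omega)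
      · rfl
  exact key _ j le_rfl h

lemma pvWeights_nil : pvWeights [] = [] := rfl

lemma pvWeights_one (a : Int) : pvWeights [a] = List.replicate a.toNat (1, 1, 1) := by
  unfold pvWeights
  rw [PySem.List.slice_to _ (by omega)]
  have ha : (max a 0).toNat = a.toNat := by omega
  simp [PySem.List.pyRepeat_singleton, ha]

lemma pvWeights_two (a b : Int) :
    pvWeights [a, b] = List.replicate a.toNat (1, 1, 1) ++ List.replicate b.toNat (5, 1, 1) := by
  unfold pvWeights
  rw [PySem.List.slice_to _ (by omega)]
  have ha : (max a 0).toNat = a.toNat := by omega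
  have hb : (max b 0).toNat = b.toNat := by omega
  simp [PySem.List.pyRepeat_singleton, ha, hb]

lemma pvWeights_big (a b c : Int) (t : List Int) :
    pvWeights (a :: b :: c :: t) =
      List.replicate a.toNat (1, 1, 1) ++ List.replicate b.toNat (5, 1, 1) ++
        List.replicate c.toNat (25, 5, 1) := by
  unfold pvWeights
  rw [PySem.List.slice_to _ (by omega)]
  have ha : (max a 0).toNat = a.toNat := by omega
  have hb : (max b 0).toNat = b.toNat := by omega
  have hc : (max c 0).toNat = c.toNat := by omega
  simp [PySem.List.pyRepeat_singleton, ha, hb, hc, List.take_succ_cons]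

lemma pvMineLoop_nil (j : Nat) (ans d i s : Int) :
    pvMineLoop j [] ans d i s = ([], ans) := by
  rw [pvMineLoop]
  simp

lemma pvMineStep (picks : List Int) (ans : Int) (c : Int × Int × Int) :
    (pvWeights picks = [] ∧ pvMineLoop 0 picks ans c.1 c.2.1 c.2.2 = (picks, ans)) ∨
    ∃ w ws, pvWeights picks = w :: ws ∧
      pvWeights (pvMineLoop 0 picks ans c.1 c.2.1 c.2.2).1 = ws ∧
      (pvMineLoop 0 picks ans c.1 c.2.1 c.2.2).2 = ans + pvDot (c, w) := by
  rcases picks with _ | ⟨a, _ | ⟨b, _ | ⟨c', t⟩⟩⟩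
  · -- []
    left
    exact ⟨pvWeights_nil, pvMineLoop_nil 0 ans _ _ _⟩
  · -- [a]
    by_cases ha : a > 0
    · right
      have hloop : pvMineLoop 0 [a] ans c.1 c.2.1 c.2.2 = ([a - 1], ans + (c.1 + c.2.1 + c.2.2)) := by
        rw [pvMineLoop]; simp [ha]
      have hsucc : a.toNat = (a - 1).toNat + 1 := by omega
      refine ⟨(1, 1, 1), List.replicate (a - 1).toNat (1, 1, 1), ?_, ?_, ?_⟩
      · rw [pvWeights_one, hsucc, List.replicate_succ]
      · rw [hloop]; exact pvWeights_one (a - 1)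
      · rw [hloop]; simp [pvDot]; try ring
    · left
      have hloop : pvMineLoop 0 [a] ans c.1 c.2.1 c.2.2 = pvMineLoop 1 [a] ans c.1 c.2.1 c.2.2 := by
        rw [pvMineLoop]; simp [ha]
      have hloop1 : pvMineLoop 1 [a] ans c.1 c.2.1 c.2.2 = ([a], ans) := by
        rw [pvMineLoop]; simp
      have hz : a.toNat = 0 := by omega
      exact ⟨by rw [pvWeights_one, hz]; rfl, by rw [hloop, hloop1]⟩
  · -- [a, b]
    by_cases ha : a > 0
    · right
      have hloop : pvMineLoop 0 [a, b] ans c.1 c.2.1 c.2.2 =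
          ([a - 1, b], ans + (c.1 + c.2.1 + c.2.2)) := by
        rw [pvMineLoop]; simp [ha]
      have hsucc : a.toNat = (a - 1).toNat + 1 := by omega
      refine ⟨(1, 1, 1), List.replicate (a - 1).toNat (1, 1, 1) ++ List.replicate b.toNat (5, 1, 1),
        ?_, ?_, ?_⟩
      · rw [pvWeights_two, hsucc, List.replicate_succ]; simp
      · rw [hloop]; exact pvWeights_two (a - 1) b
      · rw [hloop]; simp [pvDot]; try ring
    · have hz : a.toNat = 0 := by omega
      have hloop : pvMineLoop 0 [a, b] ans c.1 c.2.1 c.2.2 =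
          pvMineLoop 1 [a, b] ans c.1 c.2.1 c.2.2 := by
        rw [pvMineLoop]; simp [ha]
      by_cases hb : b > 0
      · right
        have hloop1 : pvMineLoop 1 [a, b] ans c.1 c.2.1 c.2.2 =
            ([a, b - 1], ans + (5 * c.1 + c.2.1 + c.2.2)) := by
          rw [pvMineLoop]; simp [hb, List.set]
        have hsucc : b.toNat = (b - 1).toNat + 1 := by omega
        refine ⟨(5, 1, 1), List.replicate (b - 1).toNat (5, 1, 1), ?_, ?_, ?_⟩
        · rw [pvWeights_two, hz, hsucc, List.replicate_succ]; rfl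
        · rw [hloop, hloop1]
          rw [pvWeights_two, hz]; rfl
        · rw [hloop, hloop1]; simp [pvDot]; try ring
      · left
        have hzb : b.toNat = 0 := by omega
        have hloop1 : pvMineLoop 1 [a, b] ans c.1 c.2.1 c.2.2 =
            pvMineLoop 2 [a, b] ans c.1 c.2.1 c.2.2 := by
          rw [pvMineLoop]; simp [hb]
        have hloop2 : pvMineLoop 2 [a, b] ans c.1 c.2.1 c.2.2 = ([a, b], ans) := by
          rw [pvMineLoop]; simp
        exact ⟨by rw [pvWeights_two, hz, hzb]; rfl, by rw [hloop, hloop1, hloop2]⟩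
  · -- a :: b :: c' :: t
    by_cases ha : a > 0
    · right
      have hloop : pvMineLoop 0 (a :: b :: c' :: t) ans c.1 c.2.1 c.2.2 =
          ((a - 1) :: b :: c' :: t, ans + (c.1 + c.2.1 + c.2.2)) := by
        rw [pvMineLoop]; simp [ha]
      have hsucc : a.toNat = (a - 1).toNat + 1 := by omega
      refine ⟨(1, 1, 1), List.replicate (a - 1).toNat (1, 1, 1) ++ List.replicate b.toNat (5, 1, 1)
        ++ List.replicate c'.toNat (25, 5, 1), ?_, ?_, ?_⟩
      · rw [pvWeights_big, hsucc, List.replicate_succ]; simp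
      · rw [hloop]; exact pvWeights_big (a - 1) b c' t
      · rw [hloop]; simp [pvDot]; try ring
    · have hz : a.toNat = 0 := by omega
      have hloop : pvMineLoop 0 (a :: b :: c' :: t) ans c.1 c.2.1 c.2.2 =
          pvMineLoop 1 (a :: b :: c' :: t) ans c.1 c.2.1 c.2.2 := by
        rw [pvMineLoop]; simp [ha]
      by_cases hb : b > 0
      · right
        have hloop1 : pvMineLoop 1 (a :: b :: c' :: t) ans c.1 c.2.1 c.2.2 =
            (a :: (b - 1) :: c' :: t, ans + (5 * c.1 + c.2.1 + c.2.2)) := by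
          rw [pvMineLoop]; simp [hb, List.set]
        have hsucc : b.toNat = (b - 1).toNat + 1 := by omega
        refine ⟨(5, 1, 1), List.replicate (b - 1).toNat (5, 1, 1) ++
          List.replicate c'.toNat (25, 5, 1), ?_, ?_, ?_⟩
        · rw [pvWeights_big, hz, hsucc, List.replicate_succ]; rfl
        · rw [hloop, hloop1, pvWeights_big, hz]; rfl
        · rw [hloop, hloop1]; simp [pvDot]; try ring
      · have hzb : b.toNat = 0 := by omega
        have hloop1 : pvMineLoop 1 (a :: b :: c' :: t) ans c.1 c.2.1 c.2.2 =
            pvMineLoop 2 (a :: b :: c' :: t) ans c.1 c.2.1 c.2.2 := by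
          rw [pvMineLoop]; simp [hb]
        by_cases hc : c' > 0
        · right
          have hloop2 : pvMineLoop 2 (a :: b :: c' :: t) ans c.1 c.2.1 c.2.2 =
              (a :: b :: (c' - 1) :: t, ans + (25 * c.1 + 5 * c.2.1 + c.2.2)) := by
            rw [pvMineLoop]; simp [hc, List.set]
          have hsucc : c'.toNat = (c' - 1).toNat + 1 := by omega
          refine ⟨(25, 5, 1), List.replicate (c' - 1).toNat (25, 5, 1), ?_, ?_, ?_⟩
          · rw [pvWeights_big, hz, hzb, hsucc, List.replicate_succ]; rfl
          · rw [hloop, hloop1, hloop2, pvWeights_big, hz, hzb]; rfl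
          · rw [hloop, hloop1, hloop2]; simp [pvDot]; try ring
        · left
          have hzc : c'.toNat = 0 := by omega
          have hloop2 : pvMineLoop 2 (a :: b :: c' :: t) ans c.1 c.2.1 c.2.2 =
              pvMineLoop 3 (a :: b :: c' :: t) ans c.1 c.2.1 c.2.2 := by
            rw [pvMineLoop]; simp [hc]
          have hloop3 := pvMineLoop_ge3 3 (a :: b :: c' :: t) ans c.1 c.2.1 c.2.2 (by omega)
          exact ⟨by rw [pvWeights_big, hz, hzb, hzc]; rfl,
            by rw [hloop, hloop1, hloop2, hloop3]⟩

lemma pvMineAll_eq (L : List (Int × Int × Int)) (picks : List Int) (ans : Int) :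
    (pvMineAll L picks ans).2 = ans + ((L.zip (pvWeights picks)).map pvDot).sum := by
  induction L generalizing picks ans with
  | nil => simp [pvMineAll]
  | cons c L ih =>
    simp only [pvMineAll, List.foldl_cons] at ih ⊢
    rcases pvMineStep picks ans c with ⟨hw, hst⟩ | ⟨w, ws, hw, hw', hans⟩
    · rw [hst, ih, hw]
      simp
    · rcases hpa : pvMineLoop 0 picks ans c.1 c.2.1 c.2.2 with ⟨p', a'⟩
      rw [hpa] at hw' hans
      simp only at hw' hans
      rw [ih, hw', hans, hw]
      simp only [List.zip_cons_cons, List.map_cons, List.sum_cons]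
      ring

-- trailing (0,0,0) chunks contribute nothing
lemma pvZip_pad (L : List (Int × Int × Int)) (ws : List (Int × Int × Int)) :
    (((L ++ [((0 : Int), (0 : Int), (0 : Int))]).zip ws).map pvDot).sum =
      ((L.zip ws).map pvDot).sum := by
  induction L generalizing ws with
  | nil =>
    cases ws with
    | nil => simp
    | cons w ws => simp [pvDot]
  | cons x L ih =>
    cases ws with
    | nil => simp
    | cons w ws => simp [ih]

-- ===== VERDICT (by name: the statement is the Claim_ definition above) =====
theorem solution_spec : Claim_equal_solution := by
  intro picks minerals _
  unfold Spec_solution solution solution_alt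
  have hsum : picks.foldl (fun s i => s + i) 0 = picks.sum := List.sum_eq_foldl.symm
  simp only [hsum]
  rw [pvMineAll_eq, pvSorted_eq]
  by_cases hmod :
      (if (minerals.length : Int) > picks.sum
        then PySem.List.slice minerals none (some (picks.sum * 5)) else minerals).length % 5 = 0
  · simp only [pvPad, hmod, if_pos]
    rw [pvZip_pad, zero_add]
  · simp only [pvPad, hmod, if_false]
    simp
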